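-- pv_equiv track=rewrite | github.com/pypi-data/pypi-mirror-60 | packages/vsnpdev/vsnpdev-0.0.21.tar.gz/vsnpdev-0.0.21/vsnp/vsnp_tree_methods.py | remove_identical_calls
-- ===== SOURCE A (Python) =====
-- def remove_identical_calls(group_strain_snp_sequence, consolidated_ref_snp_positions):
--     """
--     Remove any positions that have all identical SNP calls
--     :param group_strain_snp_sequence: type DICT: Dictionary of species: group: strain name: reference chromosome:
--     position: sequence
--     :param consolidated_ref_snp_positions: type DICT: Dictionary of reference name: absolute position: reference
--     base call
--     :return: non_ident_group_snp_seq: Dictionary of species: group: strain name: reference chromosome: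
--     position: sequence
--     :return: non_ident_group_positions
--     """
--     # Initialise dictionary to store the number of strains with a particular base for positions of interest
--     snp_count_dict = dict()
--     # Dictionary to store the number of strains present in each grouping
--     species_group_strain_dict = dict()
--     # Dictionary to store the non-identical SNP sequence
--     non_ident_group_snp_seq = dict()
--     # Dictionary to store the non-identical SNP positions
--     non_ident_group_positions = dict()
--     for species, group_dict in group_strain_snp_sequence.items():
--         snp_count_dict[species] = dict()
--         species_group_strain_dict[species] = dict()
--         for group, strain_dict in group_dict.items():
--             snp_count_dict[species][group] = dict()
--             # Count the number of strains in the dictionary - 1 (reference is included, but will obviously match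
--             # the reference sequence)
--             species_group_strain_dict[species][group] = len(strain_dict) - 1
--             for strain_name, ref_dict in strain_dict.items():
--                 # Filter out the reference strain
--                 if strain_name not in consolidated_ref_snp_positions:
--                     for ref_chrom, pos_dict in ref_dict.items():
--                         if ref_chrom not in snp_count_dict[species][group]:
--                             snp_count_dict[species][group][ref_chrom] = dict()
--                         for pos, seq in pos_dict.items():
--                             if pos not in snp_count_dict[species][group][ref_chrom]:
--                                 snp_count_dict[species][group][ref_chrom][pos] = dict()
--                             # If the base at this position hasn't been encountered, set the count to 1
--                             if seq not in snp_count_dict[species][group][ref_chrom][pos]: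
--                                 snp_count_dict[species][group][ref_chrom][pos][seq] = 1
--                             # Otherwise, increment the count of this sequence
--                             else:
--                                 snp_count_dict[species][group][ref_chrom][pos][seq] += 1
--     # Find all the positions that are not all the same
--     for species, group_dict in snp_count_dict.items():
--         # Initialise the species key
--         non_ident_group_snp_seq[species] = dict()
--         non_ident_group_positions[species] = dict()
--         for group, ref_dict in group_dict.items():
--             # Initialise the group key
--             non_ident_group_snp_seq[species][group] = dict()
--             non_ident_group_positions[species][group] = dict()
--             for strain_name in group_strain_snp_sequence[species][group]:
--                 # Initialise the strain name key as required
--                 if strain_name not in non_ident_group_snp_seq[species][group]: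
--                     non_ident_group_snp_seq[species][group][strain_name] = dict()
--                 for ref_chrom, pos_dict in ref_dict.items():
--                     # Initialise the reference chromosome key as required
--                     if ref_chrom not in non_ident_group_snp_seq[species][group][strain_name]:
--                         non_ident_group_snp_seq[species][group][strain_name][ref_chrom] = dict()
--                         non_ident_group_positions[species][group][ref_chrom] = set()
--                     for pos, seq_dict in pos_dict.items():
--                         # Extract the sequence for this strain at this position
--                         seq = group_strain_snp_sequence[species][group][strain_name][ref_chrom][pos]
--                         for current_seq, count in seq_dict.items():
--                             # If the count is less than the number of strains, add the strain-specific sequence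
--                             # to the dictionary
--                             if count < species_group_strain_dict[species][group]:
--                                 if pos not in non_ident_group_snp_seq[species][group][strain_name][ref_chrom]:
--                                     non_ident_group_snp_seq[species][group][strain_name][
--                                         ref_chrom][pos] = seq
--                                     # Add the position to the set of (non-identical) group-specific positions
--                                     non_ident_group_positions[species][group][ref_chrom].add(pos)
--     return non_ident_group_snp_seq, non_ident_group_positions
-- ===== SOURCE B (Python) =====
-- def remove_identical_calls(group_strain_snp_sequence, consolidated_ref_snp_positions):
--     """
--     Per species/group, gather for every (chromosome, position) the plain list of
--     bases over the non-reference strains (no counting).  A position is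
--     non-identical iff at least two distinct bases occur, or fewer strains than
--     num_strains carry it.  This closed form is equivalent to "some base is
--     shared by fewer than num_strains strains": every base present is carried by
--     at least one strain (so num_strains must be >= 2 for the threshold ever to
--     fire), and since at most num_strains + 1 strains exist, two bases can never
--     both reach the threshold.  Both outputs are then built by comprehensions
--     over the resulting per-chromosome position lists.
--     """
--     non_ident_group_snp_seq = {}
--     non_ident_group_positions = {}
--     for species, group_dict in group_strain_snp_sequence.items():
--         non_ident_group_snp_seq[species] = {}
--         non_ident_group_positions[species] = {}
--         for group, strain_dict in group_dict.items():
--             num_strains = len(strain_dict) - 1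
--             # gather the base lists of the non-reference strains
--             bases = {}
--             for strain_name, ref_dict in strain_dict.items():
--                 if strain_name not in consolidated_ref_snp_positions:
--                     for chrom, pos_dict in ref_dict.items():
--                         chrom_bases = bases.setdefault(chrom, {})
--                         for pos, seq in pos_dict.items():
--                             chrom_bases.setdefault(pos, []).append(seq)
--             # closed-form non-identity test: mixed bases, or incomplete coverage
--             nonident = {chrom: [pos for pos, bs in pos_bases.items()
--                                 if num_strains >= 2 and
--                                    (len(set(bs)) > 1 or len(bs) < num_strains)]
--                         for chrom, pos_bases in bases.items()}
--             non_ident_group_snp_seq[species][group] = {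
--                 strain_name: {chrom: {pos: ref_dict[chrom][pos] for pos in positions}
--                               for chrom, positions in nonident.items()}
--                 for strain_name, ref_dict in strain_dict.items()}
--             non_ident_group_positions[species][group] = {
--                 chrom: set(positions) for chrom, positions in nonident.items()}
--     return non_ident_group_snp_seq, non_ident_group_positions
-- ===== Notes on version B (the rewrite author's own statement) =====
-- stated objective: alternative
-- what changed: A builds per-base occurrence counters for every position and thresholds each count; B never counts: it gathers the plain list of bases per position and decides non-identity by a closed-form test (num_strains >= 2 and (two distinct bases occur or fewer than num_strains strains carry the position)), which is equivalent because each position is carried by at most num_strains+1 strains, then builds both outputs by comprehensions over the resulting position lists.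
import Mathlib
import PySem

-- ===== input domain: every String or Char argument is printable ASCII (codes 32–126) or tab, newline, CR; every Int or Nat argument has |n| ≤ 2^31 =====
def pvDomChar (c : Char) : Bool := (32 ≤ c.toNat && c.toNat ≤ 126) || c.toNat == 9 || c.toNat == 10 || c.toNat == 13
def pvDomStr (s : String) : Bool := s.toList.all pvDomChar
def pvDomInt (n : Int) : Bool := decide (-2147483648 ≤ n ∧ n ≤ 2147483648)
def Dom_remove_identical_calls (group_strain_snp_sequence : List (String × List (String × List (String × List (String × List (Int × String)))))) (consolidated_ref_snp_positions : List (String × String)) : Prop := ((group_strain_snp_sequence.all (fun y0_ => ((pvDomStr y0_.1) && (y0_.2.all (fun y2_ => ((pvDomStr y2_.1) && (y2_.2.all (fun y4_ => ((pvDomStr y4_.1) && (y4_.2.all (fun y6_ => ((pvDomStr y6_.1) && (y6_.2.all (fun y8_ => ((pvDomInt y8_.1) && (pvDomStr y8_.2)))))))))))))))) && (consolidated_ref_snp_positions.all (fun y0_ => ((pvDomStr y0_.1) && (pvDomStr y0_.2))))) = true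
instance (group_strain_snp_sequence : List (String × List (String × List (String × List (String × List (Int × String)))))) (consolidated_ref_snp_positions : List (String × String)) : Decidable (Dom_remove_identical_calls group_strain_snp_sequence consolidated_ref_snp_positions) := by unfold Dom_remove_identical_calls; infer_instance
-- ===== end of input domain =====

-- B replaces A's per-base occurrence counters and second quadruple-nested rebuilding pass by a
-- counter-free pipeline: gather the plain base list per position once and decide non-identity by
-- a closed-form set/length test, then build both outputs by comprehensions (objective: alternative).

-- ===== PORT A =====
-- A-side helpers: each Python dict is a PySem.Dict; each nested in-place mutation
-- d[k]… = … is ported as d.modify/insert at k with the updated sub-dict.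

-- group_strain_snp_sequence[species][group][strain_name][ref_chrom][pos]
def aSeq (input : List (String × List (String × List (String × List (String × List (Int × String)))))) (species group sn chrom : String) (pos : Int) : String :=
  (PySem.Dict.mk ((PySem.Dict.mk ((PySem.Dict.mk ((PySem.Dict.mk ((PySem.Dict.mk input).getD species [])).getD group [])).getD sn [])).getD chrom [])).getD pos ""

-- inner two loops of the counting pass, acting on snp_count_dict[species][group][ref_chrom]
def aCountChrom (cd : PySem.Dict Int (PySem.Dict String Int)) (pos_dict : List (Int × String)) : PySem.Dict Int (PySem.Dict String Int) :=
  pos_dict.foldl (fun cd p =>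
    let cd := if cd.contains p.1 then cd else cd.insert p.1 PySem.Dict.empty
    if (cd.getD p.1 PySem.Dict.empty).contains p.2 then
      cd.insert p.1 ((cd.getD p.1 PySem.Dict.empty).modify p.2 0 (· + 1))
    else
      cd.insert p.1 ((cd.getD p.1 PySem.Dict.empty).insert p.2 1)) cd

-- the counting pass for one group: snp_count_dict[species][group]
def aCountGroup (consolidated : List (String × String)) (strain_dict : List (String × List (String × List (Int × String)))) : PySem.Dict String (PySem.Dict Int (PySem.Dict String Int)) :=
  strain_dict.foldl (fun sc s =>
    if (PySem.Dict.mk consolidated).contains s.1 then sc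
    else s.2.foldl (fun sc c =>
      let sc := if sc.contains c.1 then sc else sc.insert c.1 PySem.Dict.empty
      sc.insert c.1 (aCountChrom (sc.getD c.1 PySem.Dict.empty) c.2)) sc) PySem.Dict.empty

-- phase-2 state for one group: (non_ident..snp_seq[species][group], non_ident..positions[species][group])
-- innermost loop: for current_seq, count in seq_dict.items()
def aSeqStep (num : Int) (sn chrom : String) (pos : Int) (seq : String) (st : PySem.Dict String (PySem.Dict String (PySem.Dict Int String)) × PySem.Dict String (PySem.Set Int)) (cc : String × Int) : PySem.Dict String (PySem.Dict String (PySem.Dict Int String)) × PySem.Dict String (PySem.Set Int) :=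
  if cc.2 < num then
    if ((st.1.getD sn PySem.Dict.empty).getD chrom PySem.Dict.empty).contains pos then st
    else (st.1.modify sn PySem.Dict.empty (fun d => d.modify chrom PySem.Dict.empty (fun pd => pd.insert pos seq)),
          st.2.modify chrom PySem.Set.empty (fun s => PySem.Set.add s pos))
  else st

-- loop: for pos, seq_dict in pos_dict.items()
def aPosStep (input : List (String × List (String × List (String × List (String × List (Int × String)))))) (species group : String) (num : Int) (sn chrom : String) (st : PySem.Dict String (PySem.Dict String (PySem.Dict Int String)) × PySem.Dict String (PySem.Set Int)) (pp : Int × PySem.Dict String Int) : PySem.Dict String (PySem.Dict String (PySem.Dict Int String)) × PySem.Dict String (PySem.Set Int) :=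
  pp.2.items.foldl (aSeqStep num sn chrom pp.1 (aSeq input species group sn chrom pp.1)) st

-- loop: for ref_chrom, pos_dict in ref_dict.items()
def aChromStep (input : List (String × List (String × List (String × List (String × List (Int × String)))))) (species group : String) (num : Int) (sn : String) (st : PySem.Dict String (PySem.Dict String (PySem.Dict Int String)) × PySem.Dict String (PySem.Set Int)) (c : String × PySem.Dict Int (PySem.Dict String Int)) : PySem.Dict String (PySem.Dict String (PySem.Dict Int String)) × PySem.Dict String (PySem.Set Int) :=
  let st := if (st.1.getD sn PySem.Dict.empty).contains c.1 then st
            else (st.1.modify sn PySem.Dict.empty (fun d => d.insert c.1 PySem.Dict.empty), st.2.insert c.1 PySem.Set.empty)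
  c.2.items.foldl (aPosStep input species group num sn c.1) st

-- loop body: for strain_name in group_strain_snp_sequence[species][group]
def aStrainStep (input : List (String × List (String × List (String × List (String × List (Int × String)))))) (species group : String) (ref_dict : PySem.Dict String (PySem.Dict Int (PySem.Dict String Int))) (num : Int) (st : PySem.Dict String (PySem.Dict String (PySem.Dict Int String)) × PySem.Dict String (PySem.Set Int)) (sn : String) : PySem.Dict String (PySem.Dict String (PySem.Dict Int String)) × PySem.Dict String (PySem.Set Int) :=
  let st := if st.1.contains sn then st else (st.1.insert sn PySem.Dict.empty, st.2)
  ref_dict.items.foldl (aChromStep input species group num sn) st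

-- loop body: for group, ref_dict in group_dict.items()
def aGroupStep (input : List (String × List (String × List (String × List (String × List (Int × String)))))) (sgsd : PySem.Dict String (PySem.Dict String Int)) (species : String) (go : PySem.Dict String (PySem.Dict String (PySem.Dict String (PySem.Dict Int String))) × PySem.Dict String (PySem.Dict String (PySem.Set Int))) (gc : String × PySem.Dict String (PySem.Dict Int (PySem.Dict String Int))) : PySem.Dict String (PySem.Dict String (PySem.Dict String (PySem.Dict Int String))) × PySem.Dict String (PySem.Dict String (PySem.Set Int)) :=
  let num := (sgsd.getD species PySem.Dict.empty).getD gc.1 0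
  let r := ((PySem.Dict.mk ((PySem.Dict.mk ((PySem.Dict.mk input).getD species [])).getD gc.1 [])).keys).foldl (aStrainStep input species gc.1 gc.2 num) (PySem.Dict.empty, PySem.Dict.empty)
  (go.1.insert gc.1 r.1, go.2.insert gc.1 r.2)

-- loop body: for species, group_dict in snp_count_dict.items()
def aSpeciesStep (input : List (String × List (String × List (String × List (String × List (Int × String)))))) (sgsd : PySem.Dict String (PySem.Dict String Int)) (o : PySem.Dict String (PySem.Dict String (PySem.Dict String (PySem.Dict String (PySem.Dict Int String)))) × PySem.Dict String (PySem.Dict String (PySem.Dict String (PySem.Set Int)))) (spc : String × PySem.Dict String (PySem.Dict String (PySem.Dict Int (PySem.Dict String Int)))) : PySem.Dict String (PySem.Dict String (PySem.Dict String (PySem.Dict String (PySem.Dict Int String)))) × PySem.Dict String (PySem.Dict String (PySem.Dict String (PySem.Set Int))) :=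
  let inner := spc.2.items.foldl (aGroupStep input sgsd spc.1) (PySem.Dict.empty, PySem.Dict.empty)
  (o.1.insert spc.1 inner.1, o.2.insert spc.1 inner.2)

def remove_identical_calls (group_strain_snp_sequence : List (String × List (String × List (String × List (String × List (Int × String)))))) (consolidated_ref_snp_positions : List (String × String)) : (List (String × List (String × List (String × List (String × List (Int × String)))))) × (List (String × List (String × List (String × List Int)))) :=
  let input := group_strain_snp_sequence
  -- phase 1: snp_count_dict and species_group_strain_dict (two independent accumulators)
  let snp_count_dict : PySem.Dict String (PySem.Dict String (PySem.Dict String (PySem.Dict Int (PySem.Dict String Int)))) :=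
    input.foldl (fun d sp => d.insert sp.1 (sp.2.foldl (fun gd g => gd.insert g.1 (aCountGroup consolidated_ref_snp_positions g.2)) PySem.Dict.empty)) PySem.Dict.empty
  let species_group_strain_dict : PySem.Dict String (PySem.Dict String Int) :=
    input.foldl (fun d sp => d.insert sp.1 (sp.2.foldl (fun gd g => gd.insert g.1 (((PySem.Dict.mk g.2).size : Int) - 1)) PySem.Dict.empty)) PySem.Dict.empty
  -- phase 2
  let res := snp_count_dict.items.foldl (aSpeciesStep input species_group_strain_dict) (PySem.Dict.empty, PySem.Dict.empty)
  (res.1.items.map (fun p => (p.1, p.2.items.map (fun q => (q.1, q.2.items.map (fun r => (r.1, r.2.items.map (fun c => (c.1, c.2.items)))))))),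
   res.2.items.map (fun p => (p.1, p.2.items.map (fun q => (q.1, q.2.items)))))

-- ===== PORT B =====
-- B-side helpers, following Source B

-- chrom_bases.setdefault(pos, []).append(seq)
def bAggChrom (cc : PySem.Dict Int (List String)) (pos_dict : List (Int × String)) : PySem.Dict Int (List String) :=
  pos_dict.foldl (fun cc p => cc.insert p.1 ((cc.getD p.1 []) ++ [p.2])) cc

-- the gathering pass over the non-reference strains of one group (no counting)
def bAgg (consolidated : List (String × String)) (strains : List (String × List (String × List (Int × String)))) : PySem.Dict String (PySem.Dict Int (List String)) :=
  strains.foldl (fun sc s =>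
    if (PySem.Dict.mk consolidated).contains s.1 then sc
    else s.2.foldl (fun sc c => sc.insert c.1 (bAggChrom (sc.getD c.1 PySem.Dict.empty) c.2)) sc) PySem.Dict.empty

-- num_strains >= 2 and (len(set(bs)) > 1 or len(bs) < num_strains)
def bKeep (num : Int) (bs : List String) : Bool :=
  decide (2 ≤ num) && (decide (1 < (PySem.Set.ofList bs).length) || decide ((bs.length : Int) < num))

-- nonident = {chrom: [pos for pos, bs in pos_bases.items() if <closed-form test>] …}
def bNonident (num : Int) (bases : PySem.Dict String (PySem.Dict Int (List String))) : List (String × List Int) :=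
  bases.items.map (fun c => (c.1, c.2.items.filterMap (fun p => if bKeep num p.2 then some p.1 else none)))

-- ref_dict[chrom][pos]
def bSeqLookup (rd : List (String × List (Int × String))) (chrom : String) (pos : Int) : String :=
  (PySem.Dict.mk ((PySem.Dict.mk rd).getD chrom [])).getD pos ""

def bSeqGroup (consolidated : List (String × String)) (strains : List (String × List (String × List (Int × String)))) : List (String × List (String × List (Int × String))) :=
  let ni := bNonident ((strains.length : Int) - 1) (bAgg consolidated strains)
  strains.map (fun s => (s.1, ni.map (fun c => (c.1, c.2.map (fun pos => (pos, bSeqLookup s.2 c.1 pos))))))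

def bPosGroup (consolidated : List (String × String)) (strains : List (String × List (String × List (Int × String)))) : List (String × List Int) :=
  let ni := bNonident ((strains.length : Int) - 1) (bAgg consolidated strains)
  ni.map (fun c => (c.1, PySem.Set.ofList c.2))

def remove_identical_calls_alt (group_strain_snp_sequence : List (String × List (String × List (String × List (String × List (Int × String)))))) (consolidated_ref_snp_positions : List (String × String)) : (List (String × List (String × List (String × List (String × List (Int × String)))))) × (List (String × List (String × List (String × List Int)))) :=
  (group_strain_snp_sequence.map (fun sp => (sp.1, sp.2.map (fun g => (g.1, bSeqGroup consolidated_ref_snp_positions g.2)))),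
   group_strain_snp_sequence.map (fun sp => (sp.1, sp.2.map (fun g => (g.1, bPosGroup consolidated_ref_snp_positions g.2)))))

-- ===== PRECONDITION & SPEC =====
-- Pre_ excludes (a) association lists with duplicate keys at some dict level — such lists do not
-- represent the Python dict arguments — and (b) inputs where some strain of a group lacks a
-- chromosome/position that was aggregated from the group's non-reference strains, on which the
-- Python A raises KeyError at the sequence lookup.
def Pre_remove_identical_calls (group_strain_snp_sequence : List (String × List (String × List (String × List (String × List (Int × String)))))) (consolidated_ref_snp_positions : List (String × String)) : Prop :=
  (consolidated_ref_snp_positions.map Prod.fst).Nodup ∧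
  (group_strain_snp_sequence.map Prod.fst).Nodup ∧
  ∀ sp ∈ group_strain_snp_sequence, (sp.2.map Prod.fst).Nodup ∧
    ∀ g ∈ sp.2, (g.2.map Prod.fst).Nodup ∧
      (∀ s ∈ g.2, (s.2.map Prod.fst).Nodup ∧ ∀ c ∈ s.2, (c.2.map Prod.fst).Nodup) ∧
      (∀ s ∈ g.2, s.1 ∉ consolidated_ref_snp_positions.map Prod.fst →
        ∀ c ∈ s.2, ∀ p ∈ c.2, ∀ s' ∈ g.2, ∃ c' ∈ s'.2, c'.1 = c.1 ∧ ∃ p' ∈ c'.2, p'.1 = p.1)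

instance (group_strain_snp_sequence : List (String × List (String × List (String × List (String × List (Int × String)))))) (consolidated_ref_snp_positions : List (String × String)) : Decidable (Pre_remove_identical_calls group_strain_snp_sequence consolidated_ref_snp_positions) := by unfold Pre_remove_identical_calls; infer_instance

def pvWitness_remove_identical_calls : (List (String × List (String × List (String × List (String × List (Int × String)))))) × (List (String × String)) :=
  ([("sp", [("g", [("ref", [("c", [(1, "A"), (2, "G")])]), ("s1", [("c", [(1, "A"), (2, "T")])]), ("s2", [("c", [(1, "C"), (2, "T")])])])])], [("ref", "A")])

def Spec_remove_identical_calls (group_strain_snp_sequence : List (String × List (String × List (String × List (String × List (Int × String)))))) (consolidated_ref_snp_positions : List (String × String)) (out : (List (String × List (String × List (String × List (String × List (Int × String)))))) × (List (String × List (String × List (String × List Int))))) : Prop := out = remove_identical_calls_alt group_strain_snp_sequence consolidated_ref_snp_positions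
instance (group_strain_snp_sequence : List (String × List (String × List (String × List (String × List (Int × String)))))) (consolidated_ref_snp_positions : List (String × String)) (out : List (String × List (String × List (String × List (String × List (Int × String))))) × List (String × List (String × List (String × List Int)))) : Decidable (Spec_remove_identical_calls group_strain_snp_sequence consolidated_ref_snp_positions out) := by
  unfold Spec_remove_identical_calls
  letI i1 : DecidableEq (List (Int × String)) := instDecidableEqList
  letI i3 : DecidableEq (List (String × List (Int × String))) := instDecidableEqList
  letI i5 : DecidableEq (List (String × List (String × List (Int × String)))) := instDecidableEqList
  letI i7 : DecidableEq (List (String × List (String × List (String × List (Int × String))))) := instDecidableEqList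
  letI i9 : DecidableEq (List (String × List (String × List (String × List (String × List (Int × String)))))) := instDecidableEqList
  letI j1 : DecidableEq (List (String × List Int)) := instDecidableEqList
  letI j2 : DecidableEq (List (String × List (String × List Int))) := instDecidableEqList
  letI j3 : DecidableEq (List (String × List (String × List (String × List Int)))) := instDecidableEqList
  exact instDecidableEqProd _ _

-- ===== CLAIM (what is proved, stated in full; the proofs are below) =====
def Claim_equal_remove_identical_calls : Prop := ∀ (group_strain_snp_sequence : List (String × List (String × List (String × List (String × List (Int × String)))))) (consolidated_ref_snp_positions : List (String × String)), Dom_remove_identical_calls group_strain_snp_sequence consolidated_ref_snp_positions → Pre_remove_identical_calls group_strain_snp_sequence consolidated_ref_snp_positions → Spec_remove_identical_calls group_strain_snp_sequence consolidated_ref_snp_positions (remove_identical_calls group_strain_snp_sequence consolidated_ref_snp_positions)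

-- ===== LEMMAS AND PROOFS =====

-- the insert-form counter of a base list (the inner dict A maintains per position)
def cnt (bs : List String) : PySem.Dict String Int :=
  bs.foldl (fun d x => d.insert x (d.getD x 0 + 1)) PySem.Dict.empty

-- value-mapping a dict (same keys, same order)
def mapV {κ ν ν' : Type} [BEq κ] (f : ν → ν') (d : PySem.Dict κ ν) : PySem.Dict κ ν' :=
  PySem.Dict.mk (d.items.map (fun p => (p.1, f p.2)))

theorem items_mapV {κ ν ν' : Type} [BEq κ] (f : ν → ν') (d : PySem.Dict κ ν) :
    (mapV f d).items = d.items.map (fun p => (p.1, f p.2)) := rfl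

theorem keys_mapV {κ ν ν' : Type} [BEq κ] (f : ν → ν') (d : PySem.Dict κ ν) :
    (mapV f d).keys = d.keys := by
  show ((d.items.map (fun p => (p.1, f p.2))).map Prod.fst) = d.items.map Prod.fst
  rw [List.map_map]; rfl

theorem contains_mapV {κ ν ν' : Type} [BEq κ] [LawfulBEq κ] [DecidableEq κ] (f : ν → ν') (d : PySem.Dict κ ν) (k : κ) :
    (mapV f d).contains k = d.contains k := by
  rw [PySem.Dict.contains_eq_decide_mem_keys, PySem.Dict.contains_eq_decide_mem_keys, keys_mapV]

theorem get?_mk_map {κ ν ν' : Type} [BEq κ] [LawfulBEq κ] (f : ν → ν') (l : List (κ × ν)) (k : κ) :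
    (PySem.Dict.mk (l.map (fun p => (p.1, f p.2)))).get? k = ((PySem.Dict.mk l).get? k).map f := by
  induction l with
  | nil => simp [PySem.Dict.get?]
  | cons p l ih =>
    rw [List.map_cons]
    rw [show ((p.1, f p.2) :: l.map (fun p => (p.1, f p.2))) = ((p.1, f p.2) :: l.map (fun p => (p.1, f p.2))) from rfl]
    rw [PySem.Dict.get?_mk_cons, PySem.Dict.get?_mk_cons]
    by_cases h : (p.1 == k) = true
    · simp [h]
    · simp only [Bool.not_eq_true] at h
      simp [h, ih]

theorem get?_mapV {κ ν ν' : Type} [BEq κ] [LawfulBEq κ] (f : ν → ν') (d : PySem.Dict κ ν) (k : κ) :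
    (mapV f d).get? k = (d.get? k).map f := by
  have hd : PySem.Dict.mk d.items = d := PySem.Dict.ext rfl
  calc (mapV f d).get? k = (PySem.Dict.mk (d.items.map (fun p => (p.1, f p.2)))).get? k := rfl
    _ = ((PySem.Dict.mk d.items).get? k).map f := get?_mk_map f d.items k
    _ = (d.get? k).map f := by rw [hd]

theorem getD_mapV {κ ν ν' : Type} [BEq κ] [LawfulBEq κ] (f : ν → ν') (d : PySem.Dict κ ν) (k : κ) (d0 : ν) :
    (mapV f d).getD k (f d0) = f (d.getD k d0) := by
  rw [PySem.Dict.getD_eq_get?_getD, PySem.Dict.getD_eq_get?_getD, get?_mapV]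
  cases d.get? k <;> rfl

theorem mapV_insert {κ ν ν' : Type} [BEq κ] [LawfulBEq κ] [DecidableEq κ] (f : ν → ν') (d : PySem.Dict κ ν) (k : κ) (v : ν) :
    mapV f (d.insert k v) = (mapV f d).insert k (f v) := by
  apply PySem.Dict.ext
  rw [items_mapV, PySem.Dict.items_insert, PySem.Dict.items_insert, contains_mapV, items_mapV]
  by_cases hc : d.contains k = true
  · simp only [hc, if_true, List.map_map]
    apply List.map_congr_left
    intro p _
    by_cases hk : (p.1 == k) = true
    · simp [Function.comp, hk]
    · simp only [Bool.not_eq_true] at hk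
      simp [Function.comp, hk]
  · simp only [Bool.not_eq_true] at hc
    simp [hc]

theorem cnt_snoc (bs : List String) (x : String) :
    cnt (bs ++ [x]) = (cnt bs).insert x ((cnt bs).getD x 0 + 1) := by
  unfold cnt
  rw [List.foldl_append]
  rfl

theorem getD_cnt (bs : List String) (v : String) :
    (cnt bs).getD v 0 = (bs.count v : Int) := by
  unfold cnt
  rw [PySem.Dict.getD_foldl_insert_add_one]
  simp

theorem nodup_keys_cnt (bs : List String) : (cnt bs).keys.Nodup := by
  unfold cnt
  exact PySem.Dict.nodup_keys_foldl_insert bs _ _ (by simp)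

theorem keys_cnt (bs : List String) : (cnt bs).keys = PySem.Set.ofList bs := by
  unfold cnt
  rw [PySem.Dict.keys_foldl_insert]
  simp [PySem.Set.update_nil_left]

-- A's counting pass equals the value-wise counter of B's gathering pass
theorem aCountChrom_mapV (cc : PySem.Dict Int (List String)) (l : List (Int × String)) :
    aCountChrom (mapV cnt cc) l = mapV cnt (bAggChrom cc l) := by
  induction l generalizing cc with
  | nil => rfl
  | cons p l ih =>
    show List.foldl _ _ (_ :: l) = mapV cnt (List.foldl _ _ (_ :: l))
    rw [List.foldl_cons, List.foldl_cons]
    have hstep : (let cd := if (mapV cnt cc).contains p.1 then (mapV cnt cc) else (mapV cnt cc).insert p.1 PySem.Dict.empty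
        if (cd.getD p.1 PySem.Dict.empty).contains p.2 then
          cd.insert p.1 ((cd.getD p.1 PySem.Dict.empty).modify p.2 0 (· + 1))
        else
          cd.insert p.1 ((cd.getD p.1 PySem.Dict.empty).insert p.2 1))
        = mapV cnt (cc.insert p.1 ((cc.getD p.1 []) ++ [p.2])) := by
      have hnorm : ∀ e : PySem.Dict String Int,
          (if e.contains p.2 then e.modify p.2 0 (· + 1) else e.insert p.2 1)
            = e.insert p.2 (e.getD p.2 0 + 1) := by
        intro e
        by_cases hs : e.contains p.2 = true
        · simp [hs, PySem.Dict.modify]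
        · simp only [Bool.not_eq_true] at hs
          simp [hs, PySem.Dict.getD_of_not_contains _ _ hs]
      rw [contains_mapV]
      by_cases hc : cc.contains p.1 = true
      · simp only [hc, if_true]
        have hg : (mapV cnt cc).getD p.1 PySem.Dict.empty = cnt (cc.getD p.1 []) :=
          getD_mapV cnt cc p.1 []
        by_cases hs : (cnt (cc.getD p.1 [])).contains p.2 = true
        · simp only [hg, hs, if_true]
          rw [show (cnt (cc.getD p.1 [])).modify p.2 0 (· + 1)
              = (cnt (cc.getD p.1 [])).insert p.2 ((cnt (cc.getD p.1 [])).getD p.2 0 + 1) from by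
            simp [PySem.Dict.modify]]
          rw [← cnt_snoc, ← mapV_insert]
        · simp only [hg, hs, Bool.false_eq_true, if_false]
          rw [show (cnt (cc.getD p.1 [])).insert p.2 1
              = (cnt (cc.getD p.1 [])).insert p.2 ((cnt (cc.getD p.1 [])).getD p.2 0 + 1) from by
            simp only [Bool.not_eq_true] at hs
            rw [PySem.Dict.getD_of_not_contains _ _ hs]
            norm_num]
          rw [← cnt_snoc, ← mapV_insert]
      · simp only [Bool.not_eq_true] at hc
        simp only [hc, Bool.false_eq_true, if_false]
        rw [PySem.Dict.getD_insert_self]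
        rw [show (PySem.Dict.empty : PySem.Dict String Int) = cnt [] from rfl]
        have hce : (cnt []).contains p.2 = false := by
          show (PySem.Dict.empty : PySem.Dict String Int).contains p.2 = false
          simp
        simp only [hce, Bool.false_eq_true, if_false]
        rw [PySem.Dict.insert_insert_self, PySem.Dict.getD_of_not_contains _ _ hc]
        rw [show (cnt []).insert p.2 1 = cnt ([] ++ [p.2]) from by
          rw [cnt_snoc []]
          rw [show (cnt []).getD p.2 0 = 0 from by rw [getD_cnt]; simp]
          norm_num]
        rw [← mapV_insert]
    rw [hstep]
    exact ih _

theorem aCountGroup_eq (cons : List (String × String)) (sd : List (String × List (String × List (Int × String)))) :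
    aCountGroup cons sd = mapV (mapV cnt) (bAgg cons sd) := by
  unfold aCountGroup bAgg
  have hchrom : ∀ (lc : List (String × List (Int × String))) (u : PySem.Dict String (PySem.Dict Int (List String))),
      lc.foldl (fun sc c =>
        let sc := if sc.contains c.1 then sc else sc.insert c.1 PySem.Dict.empty
        sc.insert c.1 (aCountChrom (sc.getD c.1 PySem.Dict.empty) c.2)) (mapV (mapV cnt) u)
      = mapV (mapV cnt) (lc.foldl (fun sc c => sc.insert c.1 (bAggChrom (sc.getD c.1 PySem.Dict.empty) c.2)) u) := by
    intro lc
    induction lc with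
    | nil => intro u; rfl
    | cons c lc ih =>
      intro u
      rw [List.foldl_cons, List.foldl_cons]
      have hstep : (let sc := if (mapV (mapV cnt) u).contains c.1 then (mapV (mapV cnt) u) else (mapV (mapV cnt) u).insert c.1 PySem.Dict.empty
          sc.insert c.1 (aCountChrom (sc.getD c.1 PySem.Dict.empty) c.2))
          = mapV (mapV cnt) (u.insert c.1 (bAggChrom (u.getD c.1 PySem.Dict.empty) c.2)) := by
        rw [contains_mapV]
        by_cases hc : u.contains c.1 = true
        · simp only [hc, if_true]
          have hg : (mapV (mapV cnt) u).getD c.1 PySem.Dict.empty = mapV cnt (u.getD c.1 PySem.Dict.empty) :=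
            getD_mapV (mapV cnt) u c.1 PySem.Dict.empty
          rw [hg, aCountChrom_mapV, ← mapV_insert]
        · simp only [Bool.not_eq_true] at hc
          simp only [hc, Bool.false_eq_true, if_false]
          rw [PySem.Dict.getD_insert_self]
          rw [show (PySem.Dict.empty : PySem.Dict Int (PySem.Dict String Int)) = mapV cnt PySem.Dict.empty from rfl]
          rw [aCountChrom_mapV, PySem.Dict.insert_insert_self,
            PySem.Dict.getD_of_not_contains _ _ hc, ← mapV_insert]
      rw [hstep, ih]
  have hmain : ∀ (ls : List (String × List (String × List (Int × String)))) (t : PySem.Dict String (PySem.Dict Int (List String))),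
      ls.foldl (fun sc s =>
        if (PySem.Dict.mk cons).contains s.1 then sc
        else s.2.foldl (fun sc c =>
          let sc := if sc.contains c.1 then sc else sc.insert c.1 PySem.Dict.empty
          sc.insert c.1 (aCountChrom (sc.getD c.1 PySem.Dict.empty) c.2)) sc) (mapV (mapV cnt) t)
      = mapV (mapV cnt) (ls.foldl (fun sc s =>
          if (PySem.Dict.mk cons).contains s.1 then sc
          else s.2.foldl (fun sc c => sc.insert c.1 (bAggChrom (sc.getD c.1 PySem.Dict.empty) c.2)) sc) t) := by
    intro ls
    induction ls with
    | nil => intro t; rfl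
    | cons s ls ih =>
      intro t
      rw [List.foldl_cons, List.foldl_cons]
      by_cases hr : (PySem.Dict.mk cons).contains s.1 = true
      · simp only [hr, if_true]
        exact ih t
      · simp only [Bool.not_eq_true] at hr
        simp only [hr, Bool.false_eq_true, if_false]
        rw [hchrom s.2 t, ih]
  exact hmain sd PySem.Dict.empty

-- keys invariants of the gathering pass (chromosome and position levels)
theorem bAggChrom_keys_nodup (cc : PySem.Dict Int (List String)) (l : List (Int × String))
    (h : cc.keys.Nodup) : (bAggChrom cc l).keys.Nodup := by
  unfold bAggChrom
  exact PySem.Dict.nodup_keys_foldl_insert_key l Prod.fst _ cc h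

theorem chromfold_inv (l : List (String × List (Int × String))) :
    ∀ sc : PySem.Dict String (PySem.Dict Int (List String)),
      sc.keys.Nodup → (∀ pr ∈ sc.items, pr.2.keys.Nodup) →
      ((l.foldl (fun sc c => sc.insert c.1 (bAggChrom (sc.getD c.1 PySem.Dict.empty) c.2)) sc).keys.Nodup ∧
        ∀ pr ∈ (l.foldl (fun sc c => sc.insert c.1 (bAggChrom (sc.getD c.1 PySem.Dict.empty) c.2)) sc).items, pr.2.keys.Nodup) := by
  induction l with
  | nil => exact fun sc h1 h2 => ⟨h1, h2⟩
  | cons c l ih =>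
    intro sc h1 h2
    rw [List.foldl_cons]
    refine ih _ (PySem.Dict.nodup_keys_insert _ _ _ h1) ?_
    intro pr hpr
    rcases (PySem.Dict.mem_items_insert _ _ _ _).mp hpr with heq | ⟨hmem, _⟩
    · subst heq
      refine bAggChrom_keys_nodup _ _ ?_
      by_cases hc : sc.contains c.1 = true
      · have hs : (sc.get? c.1).isSome = true := by
          rw [← PySem.Dict.contains_eq_isSome_get?]; exact hc
        rcases Option.isSome_iff_exists.mp hs with ⟨w, hw⟩
        rw [PySem.Dict.getD_of_get?_eq_some _ _ hw]
        exact h2 _ (PySem.Dict.mem_items_of_get?_eq_some _ hw)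
      · simp only [Bool.not_eq_true] at hc
        rw [PySem.Dict.getD_of_not_contains _ _ hc]
        simp
    · exact h2 _ hmem

theorem bAgg_inv (cons : List (String × String)) (sd : List (String × List (String × List (Int × String)))) :
    (bAgg cons sd).keys.Nodup ∧ ∀ pr ∈ (bAgg cons sd).items, pr.2.keys.Nodup := by
  unfold bAgg
  generalize hinit : (PySem.Dict.empty : PySem.Dict String (PySem.Dict Int (List String))) = init
  have h1 : init.keys.Nodup := by rw [← hinit]; simp
  have h2 : ∀ pr ∈ init.items, pr.2.keys.Nodup := by
    rw [← hinit]
    intro pr hpr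
    simp only [show (PySem.Dict.empty : PySem.Dict String (PySem.Dict Int (List String))).items = [] from rfl] at hpr
    cases hpr
  clear hinit
  induction sd generalizing init with
  | nil => exact ⟨h1, h2⟩
  | cons s sd ih =>
    rw [List.foldl_cons]
    by_cases hc : (PySem.Dict.mk cons).contains s.1 = true
    · simp only [hc, if_true]
      exact ih init h1 h2
    · simp only [Bool.not_eq_true] at hc
      simp only [hc, Bool.false_eq_true, if_false]
      obtain ⟨g1, g2⟩ := chromfold_inv s.2 init h1 h2
      exact ih _ g1 g2

-- every gathered base list is nonempty
theorem bAggChrom_ne (l : List (Int × String)) :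
    ∀ cc : PySem.Dict Int (List String), (∀ q ∈ cc.items, q.2 ≠ []) →
      ∀ q ∈ (bAggChrom cc l).items, q.2 ≠ [] := by
  induction l with
  | nil => exact fun cc h => h
  | cons p l ih =>
    intro cc h
    refine ih _ ?_
    intro q hq
    rcases (PySem.Dict.mem_items_insert _ _ _ _).mp hq with heq | ⟨hmem, _⟩
    · subst heq; simp
    · exact h _ hmem

theorem bAgg_ne (cons : List (String × String)) (sd : List (String × List (String × List (Int × String)))) :
    ∀ pr ∈ (bAgg cons sd).items, ∀ q ∈ pr.2.items, q.2 ≠ [] := by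
  unfold bAgg
  generalize hinit : (PySem.Dict.empty : PySem.Dict String (PySem.Dict Int (List String))) = init
  have h0 : ∀ pr ∈ init.items, ∀ q ∈ pr.2.items, q.2 ≠ [] := by
    rw [← hinit]
    intro pr hpr
    simp only [show (PySem.Dict.empty : PySem.Dict String (PySem.Dict Int (List String))).items = [] from rfl] at hpr
    cases hpr
  clear hinit
  induction sd generalizing init with
  | nil => exact h0
  | cons s sd ih =>
    rw [List.foldl_cons]
    by_cases hc : (PySem.Dict.mk cons).contains s.1 = true
    · simp only [hc, if_true]
      exact ih init h0
    · simp only [Bool.not_eq_true] at hc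
      simp only [hc, Bool.false_eq_true, if_false]
      refine ih _ ?_
      clear ih
      induction s.2 generalizing init with
      | nil => exact h0
      | cons c lc ihc =>
        rw [List.foldl_cons]
        refine ihc _ ?_
        intro pr hpr
        rcases (PySem.Dict.mem_items_insert _ _ _ _).mp hpr with heq | ⟨hmem, _⟩
        · subst heq
          refine bAggChrom_ne c.2 _ ?_
          by_cases hcc : init.contains c.1 = true
          · have hs : (init.get? c.1).isSome = true := by
              rw [← PySem.Dict.contains_eq_isSome_get?]; exact hcc
            rcases Option.isSome_iff_exists.mp hs with ⟨w, hw⟩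
            rw [PySem.Dict.getD_of_get?_eq_some _ _ hw]
            exact h0 _ (PySem.Dict.mem_items_of_get?_eq_some _ hw)
          · simp only [Bool.not_eq_true] at hcc
            rw [PySem.Dict.getD_of_not_contains _ _ hcc]
            intro q hq
            simp only [show (PySem.Dict.empty : PySem.Dict Int (List String)).items = [] from rfl] at hq
            cases hq
        · exact h0 _ hmem

-- length bound: each strain contributes at most one base per (chromosome, position)
theorem bAggChrom_len (l : List (Int × String)) :
    ∀ cc : PySem.Dict Int (List String), (l.map Prod.fst).Nodup → ∀ pos,
      ((bAggChrom cc l).getD pos []).length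
        ≤ (cc.getD pos []).length + (if pos ∈ l.map Prod.fst then 1 else 0) := by
  induction l with
  | nil => intro cc _ pos; simp [bAggChrom]
  | cons p l ih =>
    intro cc hnd pos
    simp only [List.map_cons, List.nodup_cons] at hnd
    have hstep : bAggChrom cc (p :: l) = bAggChrom (cc.insert p.1 ((cc.getD p.1 []) ++ [p.2])) l := rfl
    rw [hstep]
    have h1 := ih (cc.insert p.1 ((cc.getD p.1 []) ++ [p.2])) hnd.2 pos
    rw [PySem.Dict.getD_insert] at h1
    simp only [List.map_cons, List.mem_cons]
    by_cases hp : pos = p.1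
    · rw [if_pos (Or.inl hp)]
      have hnm : pos ∉ l.map Prod.fst := fun h => hnd.1 (hp ▸ h)
      rw [if_neg hnm, if_pos hp] at h1
      simp only [List.length_append, List.length_singleton] at h1
      rw [hp]
      rw [hp] at h1
      omega
    · rw [if_neg hp] at h1
      by_cases hmem : pos ∈ l.map Prod.fst
      · rw [if_pos (Or.inr hmem)]
        rw [if_pos hmem] at h1
        omega
      · rw [if_neg (fun h => h.elim hp hmem)]
        rw [if_neg hmem] at h1
        omega

theorem chromstep_len (lc : List (String × List (Int × String))) :
    ∀ sc : PySem.Dict String (PySem.Dict Int (List String)),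
      (lc.map Prod.fst).Nodup → (∀ c ∈ lc, (c.2.map Prod.fst).Nodup) → ∀ ch pos,
      (((lc.foldl (fun sc c => sc.insert c.1 (bAggChrom (sc.getD c.1 PySem.Dict.empty) c.2)) sc).getD ch PySem.Dict.empty).getD pos []).length
        ≤ ((sc.getD ch PySem.Dict.empty).getD pos []).length + (if ch ∈ lc.map Prod.fst then 1 else 0) := by
  induction lc with
  | nil => intro sc _ _ ch pos; simp
  | cons c lc ih =>
    intro sc hnd hin ch pos
    simp only [List.map_cons, List.nodup_cons] at hnd
    rw [List.foldl_cons]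
    have hin' : ∀ c' ∈ lc, (c'.2.map Prod.fst).Nodup := fun c' hc' => hin c' (List.mem_cons_of_mem _ hc')
    have h1 := ih (sc.insert c.1 (bAggChrom (sc.getD c.1 PySem.Dict.empty) c.2)) hnd.2 hin' ch pos
    rw [PySem.Dict.getD_insert] at h1
    simp only [List.map_cons, List.mem_cons]
    by_cases hch : ch = c.1
    · rw [if_pos (Or.inl hch)]
      have hnm : ch ∉ lc.map Prod.fst := fun h => hnd.1 (hch ▸ h)
      rw [if_neg hnm, if_pos hch] at h1
      have h3 := bAggChrom_len c.2 (sc.getD c.1 PySem.Dict.empty) (hin c (by simp)) pos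
      rw [hch]
      rw [hch] at h1
      split_ifs at h3 <;> omega
    · rw [if_neg hch] at h1
      by_cases hmem : ch ∈ lc.map Prod.fst
      · rw [if_pos (Or.inr hmem)]
        rw [if_pos hmem] at h1
        omega
      · rw [if_neg (fun h => h.elim hch hmem)]
        rw [if_neg hmem] at h1
        omega

theorem bAgg_len (cons : List (String × String)) (sd : List (String × List (String × List (Int × String))))
    (hs : ∀ s ∈ sd, (s.2.map Prod.fst).Nodup ∧ ∀ c ∈ s.2, (c.2.map Prod.fst).Nodup) :
    ∀ ch pos, (((bAgg cons sd).getD ch PySem.Dict.empty).getD pos []).length ≤ sd.length := by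
  unfold bAgg
  suffices h : ∀ (sd' : List (String × List (String × List (Int × String)))) (t : PySem.Dict String (PySem.Dict Int (List String))),
      (∀ s ∈ sd', (s.2.map Prod.fst).Nodup ∧ ∀ c ∈ s.2, (c.2.map Prod.fst).Nodup) → ∀ ch pos,
      (((sd'.foldl (fun sc s =>
          if (PySem.Dict.mk cons).contains s.1 then sc
          else s.2.foldl (fun sc c => sc.insert c.1 (bAggChrom (sc.getD c.1 PySem.Dict.empty) c.2)) sc) t).getD ch PySem.Dict.empty).getD pos []).length
        ≤ ((t.getD ch PySem.Dict.empty).getD pos []).length + sd'.length by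
    intro ch pos
    have := h sd PySem.Dict.empty hs ch pos
    simpa using this
  intro sd'
  induction sd' with
  | nil => intro t _ ch pos; simp
  | cons s sd' ih =>
    intro t hsd ch pos
    rw [List.foldl_cons]
    by_cases hc : (PySem.Dict.mk cons).contains s.1 = true
    · simp only [hc, if_true]
      have := ih t (fun s' hs' => hsd s' (List.mem_cons_of_mem _ hs')) ch pos
      simp only [List.length_cons]
      omega
    · simp only [Bool.not_eq_true] at hc
      simp only [hc, Bool.false_eq_true, if_false]
      obtain ⟨hn1, hn2⟩ := hsd s (by simp)
      have h1 := ih (s.2.foldl (fun sc c => sc.insert c.1 (bAggChrom (sc.getD c.1 PySem.Dict.empty) c.2)) t)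
        (fun s' hs' => hsd s' (List.mem_cons_of_mem _ hs')) ch pos
      have h2 := chromstep_len s.2 t hn1 hn2 ch pos
      simp only [List.length_cons]
      split_ifs at h2 <;> omega

-- two distinct values cannot each account for more than the whole list
theorem count_two_le (a b : String) (hab : a ≠ b) : ∀ l : List String, l.count a + l.count b ≤ l.length := by
  intro l
  induction l with
  | nil => simp
  | cons x t ih =>
    simp only [List.count_cons, List.length_cons, beq_iff_eq]
    split_ifs with h1 h2
    · exact absurd (h1.symm.trans h2) hab
    · omega
    · omega
    · omega

-- the closed-form test agrees with "some base count is below num" on nonempty lists of length ≤ num + 1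
theorem keep_core (bs : List String) (num : Int) (hne : bs ≠ []) (hb : (bs.length : Int) ≤ num + 1) :
    ((PySem.Set.ofList bs).any (fun k => decide ((bs.count k : Int) < num))) = bKeep num bs := by
  unfold bKeep
  rw [Bool.eq_iff_iff]
  simp only [List.any_eq_true, decide_eq_true_eq, Bool.and_eq_true, Bool.or_eq_true]
  constructor
  · rintro ⟨k, hk, hlt⟩
    have hkbs : k ∈ bs := (PySem.Set.mem_ofList _ _).mp hk
    have hpos : 0 < bs.count k := List.count_pos_iff.mpr hkbs
    have h2 : 2 ≤ num := by
      have h1 : (1 : Int) ≤ (bs.count k : Int) := by exact_mod_cast hpos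
      omega
    refine ⟨h2, ?_⟩
    by_cases hcard : 1 < (PySem.Set.ofList bs).length
    · exact Or.inl hcard
    · right
      have hnn : PySem.Set.ofList bs ≠ [] := by
        intro h0; rw [h0] at hk; cases hk
    -- all bases equal the single distinct element
      have hlen1 : (PySem.Set.ofList bs).length = 1 := by
        have := List.length_pos_of_ne_nil hnn
        omega
      obtain ⟨s, hs⟩ := List.length_eq_one_iff.mp hlen1
      have hall : ∀ x ∈ bs, x = s := by
        intro x hx
        have hx' : x ∈ PySem.Set.ofList bs := (PySem.Set.mem_ofList _ _).mpr hx
        rw [hs] at hx'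
        simpa using hx'
      have hcount : bs.count s = bs.length := List.count_eq_length.mpr (fun b hb' => (hall b hb').symm)
      have hk_s : k = s := hall k hkbs
      rw [hk_s, hcount] at hlt
      exact hlt
  · rintro ⟨h2, hcase⟩
    rcases hcase with hcard | hshort
    · have hcard' : 1 < (PySem.Set.ofList bs).length := hcard
      have hnd : (PySem.Set.ofList bs).Nodup := PySem.Set.nodup_ofList bs
      rcases hL : PySem.Set.ofList bs with _ | ⟨a, _ | ⟨b, T⟩⟩
      · rw [hL] at hcard'; simp at hcard'
      · rw [hL] at hcard'; simp at hcard'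
      · rw [hL] at hnd
        have hab : a ≠ b := by
          simp only [List.nodup_cons, List.mem_cons] at hnd
          exact fun h => hnd.1 (Or.inl h)
        have hma : a ∈ PySem.Set.ofList bs := by rw [hL]; simp
        have hmb : b ∈ PySem.Set.ofList bs := by rw [hL]; simp
        have hma' : a ∈ bs := (PySem.Set.mem_ofList _ _).mp hma
        have hmb' : b ∈ bs := (PySem.Set.mem_ofList _ _).mp hmb
        have hsum : bs.count a + bs.count b ≤ bs.length := count_two_le a b hab bs
        have hca : 0 < bs.count a := List.count_pos_iff.mpr hma'
        have hcb : 0 < bs.count b := List.count_pos_iff.mpr hmb'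
        by_cases hlt : (bs.count a : Int) < num
        · exact ⟨a, by simp, hlt⟩
        · refine ⟨b, by simp, ?_⟩
          have h1 : ((bs.count a : Int)) + (bs.count b : Int) ≤ (bs.length : Int) := by exact_mod_cast hsum
          have h3 : (1 : Int) ≤ (bs.count a : Int) := by exact_mod_cast hca
          omega
    · have hshort' : (bs.length : Int) < num := hshort
      rcases bs with _ | ⟨x, t⟩
      · exact absurd rfl hne
      · refine ⟨x, (PySem.Set.mem_ofList _ _).mpr (by simp), ?_⟩
        have hc : (x :: t).count x ≤ (x :: t).length := List.count_le_length
        have : ((x :: t).count x : Int) ≤ ((x :: t).length : Int) := by exact_mod_cast hc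
        omega

-- the non-identical position list of one chromosome's count dict (A's per-position test)
def niList (num : Int) (pd : PySem.Dict Int (PySem.Dict String Int)) : List Int :=
  pd.items.filterMap (fun p => if p.2.values.any (fun cnt => decide (cnt < num)) then some p.1 else none)

theorem cnt_values_any (bs : List String) (num : Int) :
    (cnt bs).values.any (fun c => decide (c < num))
      = (PySem.Set.ofList bs).any (fun k => decide ((bs.count k : Int) < num)) := by
  rw [PySem.Dict.values_eq_map_keys (cnt bs) (nodup_keys_cnt bs) 0, keys_cnt, List.any_map]
  simp only [getD_cnt]
  rfl

-- A's count-based test equals B's closed-form test, position by position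
theorem ni_eq (num : Int) (pd : PySem.Dict Int (List String))
    (h : ∀ q ∈ pd.items, q.2 ≠ [] ∧ (q.2.length : Int) ≤ num + 1) :
    niList num (mapV cnt pd) = pd.items.filterMap (fun p => if bKeep num p.2 then some p.1 else none) := by
  unfold niList
  rw [items_mapV, List.filterMap_map]
  apply List.filterMap_congr
  intro p hp
  obtain ⟨hne, hb⟩ := h p hp
  show (if (cnt p.2).values.any (fun cnt => decide (cnt < num)) then some p.1 else none) = _
  rw [cnt_values_any, keep_core p.2 num hne hb]

-- re-inserting a present binding is the identity
theorem dict_insert_self_of_mem {κ ν : Type} [BEq κ] [LawfulBEq κ] (d : PySem.Dict κ ν) {k : κ} {v : ν}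
    (hnd : d.keys.Nodup) (hm : (k, v) ∈ d.items) : d.insert k v = d := by
  apply PySem.Dict.ext
  have hc : d.contains k = true := by
    have := PySem.Dict.get?_of_mem_items d hm hnd
    simp [PySem.Dict.contains_eq_isSome_get?, this]
  rw [PySem.Dict.items_insert_of_contains d v hc]
  conv_rhs => rw [← List.map_id d.items]
  apply List.map_congr_left
  intro p hp
  by_cases hk : p.1 = k
  · have : d.get? p.1 = some p.2 := PySem.Dict.get?_of_mem_items d hp hnd
    have h2 : d.get? k = some v := PySem.Dict.get?_of_mem_items d hm hnd
    rw [hk] at this; rw [this] at h2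
    obtain ⟨a, b⟩ := p
    simp only at hk
    subst hk
    simp only at h2
    simp [Option.some_inj.mp h2]
  · simp [hk]

-- first-match lookup in a duplicate-free association list
theorem mkGetD {κ ν : Type} [BEq κ] [LawfulBEq κ] {l : List (κ × ν)} {k : κ} {v : ν} (d0 : ν)
    (hnd : (l.map Prod.fst).Nodup) (hm : (k, v) ∈ l) : (PySem.Dict.mk l).getD k d0 = v :=
  PySem.Dict.getD_of_mem_items (PySem.Dict.mk l) hm hnd d0

-- the innermost loop is the identity once pos is already recorded for this strain/chromosome
theorem seqfold_id (num : Int) (sn chrom : String) (pos : Int) (seq : String) (l : List (String × Int)) :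
    ∀ st : PySem.Dict String (PySem.Dict String (PySem.Dict Int String)) × PySem.Dict String (PySem.Set Int),
      ((st.1.getD sn PySem.Dict.empty).getD chrom PySem.Dict.empty).contains pos = true →
      l.foldl (aSeqStep num sn chrom pos seq) st = st := by
  induction l with
  | nil => intro st _; rfl
  | cons cc l ih =>
    intro st h
    rw [List.foldl_cons]
    have hstep : aSeqStep num sn chrom pos seq st cc = st := by
      unfold aSeqStep
      by_cases hlt : cc.2 < num
      · rw [if_pos hlt, if_pos h]
      · rw [if_neg hlt]
    rw [hstep]
    exact ih st h

-- the innermost loop records pos (in both components) iff some count is below num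
theorem seqfold_main (num : Int) (sn chrom : String) (pos : Int) (seq : String)
    (S₀ : PySem.Dict String (PySem.Dict String (PySem.Dict Int String)))
    (D : PySem.Dict String (PySem.Dict Int String)) (E₂ : PySem.Dict Int String)
    (P₀ : PySem.Dict String (PySem.Set Int)) (s : PySem.Set Int)
    (hE : E₂.contains pos = false) (l : List (String × Int)) :
    l.foldl (aSeqStep num sn chrom pos seq) (S₀.insert sn (D.insert chrom E₂), P₀.insert chrom s)
      = if l.any (fun cc => decide (cc.2 < num)) then
          (S₀.insert sn (D.insert chrom (E₂.insert pos seq)), P₀.insert chrom (PySem.Set.add s pos))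
        else (S₀.insert sn (D.insert chrom E₂), P₀.insert chrom s) := by
  induction l with
  | nil => simp
  | cons cc l ih =>
    by_cases hlt : cc.2 < num
    · have hstep : aSeqStep num sn chrom pos seq (S₀.insert sn (D.insert chrom E₂), P₀.insert chrom s) cc
          = (S₀.insert sn (D.insert chrom (E₂.insert pos seq)), P₀.insert chrom (PySem.Set.add s pos)) := by
        unfold aSeqStep
        rw [if_pos hlt]
        simp [PySem.Dict.getD_insert_self, hE, PySem.Dict.modify, PySem.Dict.insert_insert_self]
      rw [List.foldl_cons, hstep,
        seqfold_id num sn chrom pos seq l _ (by simp [PySem.Dict.getD_insert_self])]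
      simp [hlt]
    · have hstep : aSeqStep num sn chrom pos seq (S₀.insert sn (D.insert chrom E₂), P₀.insert chrom s) cc
          = (S₀.insert sn (D.insert chrom E₂), P₀.insert chrom s) := by
        unfold aSeqStep
        rw [if_neg hlt]
      rw [List.foldl_cons, hstep, ih]
      have hd : decide (cc.2 < num) = false := by simp [hlt]
      simp only [List.any_cons, hd, Bool.false_or]

-- a fold of conditional inserts at fresh distinct keys appends the filtered bindings
theorem cond_insert_fold_items {κ α ν : Type} [BEq κ] [LawfulBEq κ] (c : κ × α → Bool) (v : κ → ν) :
    ∀ (lp : List (κ × α)) (d : PySem.Dict κ ν),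
      (∀ p ∈ lp, d.contains p.1 = false) → (lp.map Prod.fst).Nodup →
      (lp.foldl (fun e p => if c p then e.insert p.1 (v p.1) else e) d).items
        = d.items ++ lp.filterMap (fun p => if c p then some (p.1, v p.1) else none) := by
  intro lp
  induction lp with
  | nil => simp
  | cons p lp ih =>
    intro d hfresh hnd
    simp only [List.map_cons, List.nodup_cons] at hnd
    by_cases hcp : c p = true
    · rw [List.foldl_cons, List.filterMap_cons]
      simp only [hcp, if_true]
      rw [ih (d.insert p.1 (v p.1)) ?_ hnd.2]
      · rw [PySem.Dict.items_insert_of_not_contains _ _ (hfresh p (by simp))]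
        simp
      · intro q hq
        rw [PySem.Dict.contains_insert]
        have : q.1 ≠ p.1 := fun h => hnd.1 (h ▸ List.mem_map_of_mem hq)
        simp [this, hfresh q (List.mem_cons_of_mem _ hq)]
    · simp only [Bool.not_eq_true] at hcp
      rw [List.foldl_cons, List.filterMap_cons]
      simp only [hcp, Bool.false_eq_true, if_false]
      exact ih d (fun q hq => hfresh q (List.mem_cons_of_mem _ hq)) hnd.2

-- a fold of conditional set-adds of fresh distinct elements appends the filtered elements
theorem cond_add_fold {κ α : Type} [BEq κ] [LawfulBEq κ] (c : κ × α → Bool) :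
    ∀ (lp : List (κ × α)) (s : PySem.Set κ),
      (∀ p ∈ lp, p.1 ∉ s) → (lp.map Prod.fst).Nodup →
      lp.foldl (fun t p => if c p then PySem.Set.add t p.1 else t) s
        = s ++ lp.filterMap (fun p => if c p then some p.1 else none) := by
  intro lp
  induction lp with
  | nil => simp
  | cons p lp ih =>
    intro s hfresh hnd
    simp only [List.map_cons, List.nodup_cons] at hnd
    by_cases hcp : c p = true
    · rw [List.foldl_cons, List.filterMap_cons]
      simp only [hcp, if_true]
      rw [PySem.Set.add_of_not_mem (hfresh p (by simp)), ih (s ++ [p.1]) ?_ hnd.2]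
      · simp
      · intro q hq
        simp only [List.mem_append, List.mem_singleton, not_or]
        exact ⟨hfresh q (List.mem_cons_of_mem _ hq),
          fun h => hnd.1 (h ▸ List.mem_map_of_mem hq)⟩
    · simp only [Bool.not_eq_true] at hcp
      rw [List.foldl_cons, List.filterMap_cons]
      simp only [hcp, Bool.false_eq_true, if_false]
      exact ih s (fun q hq => hfresh q (List.mem_cons_of_mem _ hq)) hnd.2

theorem filterMap_if_pair {κ α ν : Type} (c : κ × α → Bool) (v : κ → ν) (l : List (κ × α)) :
    l.filterMap (fun p => if c p then some (p.1, v p.1) else none)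
      = (l.filterMap (fun p => if c p then some p.1 else none)).map (fun x => (x, v x)) := by
  induction l with
  | nil => simp
  | cons p l ih =>
    by_cases hcp : c p = true <;> simp [hcp, ih]

-- the pos/seq_dict loops for one chromosome of one strain
theorem posfold (input : List (String × List (String × List (String × List (String × List (Int × String)))))) (species group : String) (num : Int) (sn chrom : String) :
    ∀ (lp : List (Int × PySem.Dict String Int))
      (S₀ : PySem.Dict String (PySem.Dict String (PySem.Dict Int String)))
      (D : PySem.Dict String (PySem.Dict Int String)) (E₂ : PySem.Dict Int String)
      (P₀ : PySem.Dict String (PySem.Set Int)) (s : PySem.Set Int),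
      (lp.map Prod.fst).Nodup → (∀ p ∈ lp, E₂.contains p.1 = false) →
      lp.foldl (aPosStep input species group num sn chrom) (S₀.insert sn (D.insert chrom E₂), P₀.insert chrom s)
        = (S₀.insert sn (D.insert chrom (lp.foldl (fun e p => if p.2.values.any (fun cnt => decide (cnt < num)) then e.insert p.1 (aSeq input species group sn chrom p.1) else e) E₂)),
           P₀.insert chrom (lp.foldl (fun t p => if p.2.values.any (fun cnt => decide (cnt < num)) then PySem.Set.add t p.1 else t) s)) := by
  intro lp
  induction lp with
  | nil => intro S₀ D E₂ P₀ s _ _; rfl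
  | cons p lp ih =>
    intro S₀ D E₂ P₀ s hnd hfresh
    simp only [List.map_cons, List.nodup_cons] at hnd
    have hval : (p.2.values.any (fun cnt => decide (cnt < num)))
        = (p.2.items.any (fun cc => decide (cc.2 < num))) := by
      show ((p.2.items.map Prod.snd).any fun cnt => decide (cnt < num)) = _
      rw [List.any_map]
      rfl
    have hstep : aPosStep input species group num sn chrom (S₀.insert sn (D.insert chrom E₂), P₀.insert chrom s) p
        = if p.2.values.any (fun cnt => decide (cnt < num)) then
            (S₀.insert sn (D.insert chrom (E₂.insert p.1 (aSeq input species group sn chrom p.1))),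
             P₀.insert chrom (PySem.Set.add s p.1))
          else (S₀.insert sn (D.insert chrom E₂), P₀.insert chrom s) := by
      unfold aPosStep
      rw [seqfold_main num sn chrom p.1 _ S₀ D E₂ P₀ s (hfresh p (by simp)), hval]
    rw [List.foldl_cons, hstep]
    by_cases hany : (p.2.values.any fun cnt => decide (cnt < num)) = true
    · simp only [hany, if_true]
      rw [ih S₀ D _ P₀ _ hnd.2 ?_]
      · simp only [List.foldl_cons, hany, if_true]
      · intro q hq
        rw [PySem.Dict.contains_insert]
        have : q.1 ≠ p.1 := fun h => hnd.1 (h ▸ List.mem_map_of_mem hq)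
        simp [this, hfresh q (List.mem_cons_of_mem _ hq)]
    · simp only [Bool.not_eq_true] at hany
      simp only [hany, Bool.false_eq_true, if_false]
      rw [ih S₀ D E₂ P₀ s hnd.2 (fun q hq => hfresh q (List.mem_cons_of_mem _ hq))]
      simp only [List.foldl_cons, hany, Bool.false_eq_true, if_false]

-- the chromosome loop for one strain
theorem chromfold (input : List (String × List (String × List (String × List (String × List (Int × String)))))) (species group : String) (num : Int) (sn : String) :
    ∀ (lc : List (String × PySem.Dict Int (PySem.Dict String Int)))
      (S₀ : PySem.Dict String (PySem.Dict String (PySem.Dict Int String)))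
      (D : PySem.Dict String (PySem.Dict Int String)) (P : PySem.Dict String (PySem.Set Int)),
      (lc.map Prod.fst).Nodup → (∀ c ∈ lc, D.contains c.1 = false) → (∀ c ∈ lc, c.2.keys.Nodup) →
      lc.foldl (aChromStep input species group num sn) (S₀.insert sn D, P)
        = (S₀.insert sn (lc.foldl (fun d c => d.insert c.1 (PySem.Dict.mk ((niList num c.2).map (fun pos => (pos, aSeq input species group sn c.1 pos))))) D),
           lc.foldl (fun pP c => pP.insert c.1 ((niList num c.2 : PySem.Set Int))) P) := by
  intro lc
  induction lc with
  | nil => intro S₀ D P _ _ _; rfl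
  | cons c lc ih =>
    intro S₀ D P hnd hfresh hinner
    simp only [List.map_cons, List.nodup_cons] at hnd
    have hstep : aChromStep input species group num sn (S₀.insert sn D, P) c
        = (S₀.insert sn (D.insert c.1 (PySem.Dict.mk ((niList num c.2).map (fun pos => (pos, aSeq input species group sn c.1 pos))))),
           P.insert c.1 ((niList num c.2 : PySem.Set Int))) := by
      unfold aChromStep
      have hg : ((S₀.insert sn D).getD sn PySem.Dict.empty).contains c.1 = false := by
        rw [PySem.Dict.getD_insert_self]
        exact hfresh c (by simp)
      simp only [hg, Bool.false_eq_true, if_false]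
      have hmod : ((S₀.insert sn D).modify sn PySem.Dict.empty (fun d => d.insert c.1 PySem.Dict.empty), P.insert c.1 PySem.Set.empty)
          = (S₀.insert sn (D.insert c.1 PySem.Dict.empty), P.insert c.1 PySem.Set.empty) := by
        simp [PySem.Dict.modify, PySem.Dict.getD_insert_self, PySem.Dict.insert_insert_self]
      rw [hmod]
      rw [posfold input species group num sn c.1 c.2.items S₀ D PySem.Dict.empty P PySem.Set.empty
        (hinner c (by simp)) (fun q _ => PySem.Dict.contains_empty q.1)]
      rw [Prod.mk.injEq]
      constructor
      · congr 1
        apply congrArg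
        apply PySem.Dict.ext
        rw [cond_insert_fold_items (fun p => p.2.values.any (fun cnt => decide (cnt < num)))
          (fun pos => aSeq input species group sn c.1 pos) c.2.items PySem.Dict.empty
          (fun q _ => PySem.Dict.contains_empty q.1) (hinner c (by simp))]
        rw [filterMap_if_pair]
        rfl
      · apply congrArg
        rw [cond_add_fold (fun p => p.2.values.any (fun cnt => decide (cnt < num))) c.2.items
          PySem.Set.empty (fun q _ hq => by simp [PySem.Set.empty] at hq) (hinner c (by simp))]
        rfl
    rw [List.foldl_cons, hstep, ih S₀ _ _ hnd.2 ?_ (fun q hq => hinner q (List.mem_cons_of_mem _ hq))]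
    · rfl
    · intro q hq
      rw [PySem.Dict.contains_insert]
      have : q.1 ≠ c.1 := fun h => hnd.1 (h ▸ List.mem_map_of_mem hq)
      simp [this, hfresh q (List.mem_cons_of_mem _ hq)]

-- a fold of inserts at fresh distinct keys from the empty dict builds the literal dict
theorem fresh_fold_mk {κ ν β : Type} [BEq κ] [LawfulBEq κ] (l : List β) (k : β → κ) (v : β → ν)
    (h : (l.map k).Nodup) :
    l.foldl (fun d a => d.insert (k a) (v a)) PySem.Dict.empty = PySem.Dict.mk (l.map (fun a => (k a, v a))) := by
  apply PySem.Dict.ext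
  rw [PySem.Dict.items_foldl_insert_fresh l k v PySem.Dict.empty (fun a _ => PySem.Dict.contains_empty (k a)) h]
  rfl

-- re-inserting existing bindings with their own values is the identity
theorem reinsert_fold {κ ν β : Type} [BEq κ] [LawfulBEq κ] (l : List β) (k : β → κ) (v : β → ν)
    (h : (l.map k).Nodup) :
    ∀ l' : List β, (∀ a ∈ l', a ∈ l) →
      l'.foldl (fun d a => d.insert (k a) (v a)) (PySem.Dict.mk (l.map (fun a => (k a, v a)))) = PySem.Dict.mk (l.map (fun a => (k a, v a))) := by
  intro l'
  induction l' with
  | nil => intro _; rfl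
  | cons a l' ih =>
    intro hsub
    rw [List.foldl_cons, dict_insert_self_of_mem _ ?_ ?_, ih (fun b hb => hsub b (List.mem_cons_of_mem _ hb))]
    · show (List.map Prod.fst (l.map (fun a => (k a, v a)))).Nodup
      rw [List.map_map]
      exact h
    · show (k a, v a) ∈ l.map (fun a => (k a, v a))
      exact List.mem_map_of_mem (hsub a (by simp))

-- the per-strain value and the final per-chromosome position sets
def sVal (input : List (String × List (String × List (String × List (String × List (Int × String)))))) (species group sn : String) (num : Int) (lc : List (String × PySem.Dict Int (PySem.Dict String Int))) : PySem.Dict String (PySem.Dict Int String) :=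
  PySem.Dict.mk (lc.map (fun c => (c.1, PySem.Dict.mk ((niList num c.2).map (fun pos => (pos, aSeq input species group sn c.1 pos))))))

def pFinal (num : Int) (lc : List (String × PySem.Dict Int (PySem.Dict String Int))) : PySem.Dict String (PySem.Set Int) :=
  PySem.Dict.mk (lc.map (fun c => (c.1, (niList num c.2 : PySem.Set Int))))

-- the strain loop of phase 2 for one group
theorem strainfold (input : List (String × List (String × List (String × List (String × List (Int × String)))))) (species group : String)
    (ref_dict : PySem.Dict String (PySem.Dict Int (PySem.Dict String Int))) (num : Int)
    (hknd : ref_dict.keys.Nodup) (hinner : ∀ c ∈ ref_dict.items, c.2.keys.Nodup) :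
    ∀ (ls : List String) (S : PySem.Dict String (PySem.Dict String (PySem.Dict Int String))) (P : PySem.Dict String (PySem.Set Int)),
      ls.Nodup → (∀ n ∈ ls, S.contains n = false) →
      (P = PySem.Dict.empty ∨ P = pFinal num ref_dict.items) →
      ls.foldl (aStrainStep input species group ref_dict num) (S, P)
        = (ls.foldl (fun S n => S.insert n (sVal input species group n num ref_dict.items)) S,
           if ls.isEmpty then P else pFinal num ref_dict.items) := by
  intro ls
  induction ls with
  | nil => intro S P _ _ _; rfl
  | cons sn ls ih =>
    intro S P hnd hfresh hP
    simp only [List.nodup_cons] at hnd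
    have hstep : aStrainStep input species group ref_dict num (S, P) sn
        = (S.insert sn (sVal input species group sn num ref_dict.items), pFinal num ref_dict.items) := by
      unfold aStrainStep
      have hc : S.contains sn = false := hfresh sn (by simp)
      simp only [hc, Bool.false_eq_true, if_false]
      rw [chromfold input species group num sn ref_dict.items S PySem.Dict.empty P hknd
        (fun c _ => PySem.Dict.contains_empty c.1) hinner]
      rw [Prod.mk.injEq]
      constructor
      · apply congrArg
        exact fresh_fold_mk ref_dict.items Prod.fst _ hknd
      · rcases hP with hP | hP
        · rw [hP]
          exact fresh_fold_mk ref_dict.items Prod.fst _ hknd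
        · rw [hP]
          exact reinsert_fold ref_dict.items Prod.fst _ hknd ref_dict.items (fun a ha => ha)
    rw [List.foldl_cons, hstep, ih _ _ hnd.2 ?_ (Or.inr rfl)]
    · rw [List.foldl_cons]
      simp only [List.isEmpty_cons, Bool.false_eq_true, if_false, ite_self]
    · intro n hn
      rw [PySem.Dict.contains_insert]
      have : n ≠ sn := fun h => hnd.1 (h ▸ hn)
      simp [this, hfresh n (List.mem_cons_of_mem _ hn)]

-- a pair of insert-folds with element-determined values builds the two literal dicts
theorem pair_fresh_fold {κ₁ κ₂ ν₁ ν₂ β : Type} [BEq κ₁] [LawfulBEq κ₁] [BEq κ₂] [LawfulBEq κ₂]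
    (l : List β) (k1 : β → κ₁) (k2 : β → κ₂) (v1 : β → ν₁) (v2 : β → ν₂)
    (h1 : (l.map k1).Nodup) (h2 : (l.map k2).Nodup) :
    l.foldl (fun o a => (o.1.insert (k1 a) (v1 a), o.2.insert (k2 a) (v2 a))) (PySem.Dict.empty, PySem.Dict.empty)
      = (PySem.Dict.mk (l.map (fun a => (k1 a, v1 a))), PySem.Dict.mk (l.map (fun a => (k2 a, v2 a)))) := by
  have hsplit : l.foldl (fun o a => (o.1.insert (k1 a) (v1 a), o.2.insert (k2 a) (v2 a))) (PySem.Dict.empty, PySem.Dict.empty)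
      = (l.foldl (fun d a => d.insert (k1 a) (v1 a)) PySem.Dict.empty, l.foldl (fun d a => d.insert (k2 a) (v2 a)) PySem.Dict.empty) :=
    PySem.List.foldl_prod_mk (fun (d : PySem.Dict κ₁ ν₁) a => d.insert (k1 a) (v1 a)) (fun (d : PySem.Dict κ₂ ν₂) a => d.insert (k2 a) (v2 a)) l _ _
  rw [hsplit, fresh_fold_mk l k1 v1 h1, fresh_fold_mk l k2 v2 h2]

theorem cond_filterMap_sublist {κ α : Type} (c : κ × α → Bool) (l : List (κ × α)) :
    (l.filterMap (fun p => if c p then some p.1 else none)).Sublist (l.map Prod.fst) := by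
  induction l with
  | nil => simp
  | cons p l ih =>
    by_cases hcp : c p = true
    · simpa [hcp] using ih.cons₂ p.1
    · simp only [Bool.not_eq_true] at hcp
      simpa [hcp] using ih.cons p.1

theorem items_mk {κ ν : Type} [BEq κ] (l : List (κ × ν)) : (PySem.Dict.mk l).items = l := rfl

-- key invariants of A's count dict, transported from the gathering pass
theorem acg_keys_nodup (cons : List (String × String)) (g2 : List (String × List (String × List (Int × String)))) :
    (aCountGroup cons g2).keys.Nodup := by
  rw [aCountGroup_eq, keys_mapV]
  exact (bAgg_inv cons g2).1

theorem acg_inner_nodup (cons : List (String × String)) (g2 : List (String × List (String × List (Int × String)))) :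
    ∀ c ∈ (aCountGroup cons g2).items, c.2.keys.Nodup := by
  intro c hc
  rw [aCountGroup_eq, items_mapV] at hc
  obtain ⟨q, hq, rfl⟩ := List.mem_map.mp hc
  show (mapV cnt q.2).keys.Nodup
  rw [keys_mapV]
  exact (bAgg_inv cons g2).2 q hq

-- phase 2 for one group, with the global lookups resolved
theorem group_r (input : List (String × List (String × List (String × List (String × List (Int × String)))))) (cons : List (String × String))
    (sp : String × List (String × List (String × List (String × List (Int × String)))))
    (g : String × List (String × List (String × List (Int × String))))
    (hspm : sp ∈ input) (hgm : g ∈ sp.2)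
    (hind : (input.map Prod.fst).Nodup) (hgn : (sp.2.map Prod.fst).Nodup) (hsn : (g.2.map Prod.fst).Nodup)
    (num : Int) :
    ((PySem.Dict.mk ((PySem.Dict.mk ((PySem.Dict.mk input).getD sp.1 [])).getD g.1 [])).keys).foldl
        (aStrainStep input sp.1 g.1 (aCountGroup cons g.2) num) (PySem.Dict.empty, PySem.Dict.empty)
      = (PySem.Dict.mk ((g.2.map Prod.fst).map (fun n => (n, sVal input sp.1 g.1 n num (aCountGroup cons g.2).items))),
         if (g.2.map Prod.fst).isEmpty then PySem.Dict.empty else pFinal num (aCountGroup cons g.2).items) := by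
  have h1 : (PySem.Dict.mk input).getD sp.1 [] = sp.2 := mkGetD [] hind (by simpa using hspm)
  have h2 : (PySem.Dict.mk sp.2).getD g.1 [] = g.2 := mkGetD [] hgn (by simpa using hgm)
  rw [h1, h2]
  have hkeys : (PySem.Dict.mk g.2).keys = g.2.map Prod.fst := rfl
  rw [hkeys]
  rw [strainfold input sp.1 g.1 (aCountGroup cons g.2) num
    (acg_keys_nodup cons g.2) (acg_inner_nodup cons g.2)
    (g.2.map Prod.fst) PySem.Dict.empty PySem.Dict.empty hsn
    (fun n _ => PySem.Dict.contains_empty n) (Or.inl rfl)]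
  rw [show (List.foldl (fun S n => S.insert n (sVal input sp.1 g.1 n num (aCountGroup cons g.2).items)) PySem.Dict.empty (g.2.map Prod.fst))
      = PySem.Dict.mk ((g.2.map Prod.fst).map (fun n => (n, sVal input sp.1 g.1 n num (aCountGroup cons g.2).items)))
    from by
      rw [fresh_fold_mk (g.2.map Prod.fst) (fun n => n) (fun n => sVal input sp.1 g.1 n num (aCountGroup cons g.2).items) (by simpa using hsn)]]

-- the strain-loop result of one group, as phase 2 computes it
def aGroupR (input : List (String × List (String × List (String × List (String × List (Int × String)))))) (sgsd : PySem.Dict String (PySem.Dict String Int)) (species : String) (gc : String × PySem.Dict String (PySem.Dict Int (PySem.Dict String Int))) : PySem.Dict String (PySem.Dict String (PySem.Dict Int String)) × PySem.Dict String (PySem.Set Int) :=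
  ((PySem.Dict.mk ((PySem.Dict.mk ((PySem.Dict.mk input).getD species [])).getD gc.1 [])).keys).foldl
    (aStrainStep input species gc.1 gc.2 ((sgsd.getD species PySem.Dict.empty).getD gc.1 0)) (PySem.Dict.empty, PySem.Dict.empty)

theorem groupfold (input : List (String × List (String × List (String × List (String × List (Int × String)))))) (sgsd : PySem.Dict String (PySem.Dict String Int)) (species : String)
    (lg : List (String × PySem.Dict String (PySem.Dict Int (PySem.Dict String Int)))) (h : (lg.map Prod.fst).Nodup) :
    lg.foldl (aGroupStep input sgsd species) (PySem.Dict.empty, PySem.Dict.empty)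
      = (PySem.Dict.mk (lg.map (fun gc => (gc.1, (aGroupR input sgsd species gc).1))),
         PySem.Dict.mk (lg.map (fun gc => (gc.1, (aGroupR input sgsd species gc).2)))) :=
  pair_fresh_fold lg Prod.fst Prod.fst (fun gc => (aGroupR input sgsd species gc).1) (fun gc => (aGroupR input sgsd species gc).2) h h

def aSpInner (input : List (String × List (String × List (String × List (String × List (Int × String)))))) (sgsd : PySem.Dict String (PySem.Dict String Int)) (spc : String × PySem.Dict String (PySem.Dict String (PySem.Dict Int (PySem.Dict String Int)))) : PySem.Dict String (PySem.Dict String (PySem.Dict String (PySem.Dict Int String))) × PySem.Dict String (PySem.Dict String (PySem.Set Int)) :=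
  spc.2.items.foldl (aGroupStep input sgsd spc.1) (PySem.Dict.empty, PySem.Dict.empty)

theorem speciesfold (input : List (String × List (String × List (String × List (String × List (Int × String)))))) (sgsd : PySem.Dict String (PySem.Dict String Int))
    (l : List (String × PySem.Dict String (PySem.Dict String (PySem.Dict Int (PySem.Dict String Int))))) (h : (l.map Prod.fst).Nodup) :
    l.foldl (aSpeciesStep input sgsd) (PySem.Dict.empty, PySem.Dict.empty)
      = (PySem.Dict.mk (l.map (fun spc => (spc.1, (aSpInner input sgsd spc).1))),
         PySem.Dict.mk (l.map (fun spc => (spc.1, (aSpInner input sgsd spc).2)))) :=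
  pair_fresh_fold l Prod.fst Prod.fst (fun spc => (aSpInner input sgsd spc).1) (fun spc => (aSpInner input sgsd spc).2) h h

-- the sequence lookup chains of A and B agree on duplicate-free inputs
theorem aSeq_resolve (input : List (String × List (String × List (String × List (String × List (Int × String))))))
    (sp : String × List (String × List (String × List (String × List (Int × String)))))
    (g : String × List (String × List (String × List (Int × String))))
    (st : String × List (String × List (Int × String)))
    (hspm : sp ∈ input) (hgm : g ∈ sp.2) (hsm : st ∈ g.2)
    (hind : (input.map Prod.fst).Nodup) (hgn : (sp.2.map Prod.fst).Nodup) (hsn : (g.2.map Prod.fst).Nodup)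
    (chrom : String) (pos : Int) :
    aSeq input sp.1 g.1 st.1 chrom pos = bSeqLookup st.2 chrom pos := by
  unfold aSeq bSeqLookup
  rw [mkGetD [] hind (by simpa using hspm), mkGetD [] hgn (by simpa using hgm),
    mkGetD [] hsn (by simpa using hsm)]

-- A's per-chromosome non-identical position lists equal B's (count test vs closed-form test)
theorem acg_ni (cons : List (String × String)) (g2 : List (String × List (String × List (Int × String))))
    (hnods : ∀ s ∈ g2, (s.2.map Prod.fst).Nodup ∧ ∀ c ∈ s.2, (c.2.map Prod.fst).Nodup) :
    (aCountGroup cons g2).items.map (fun c => (c.1, niList ((g2.length : Int) - 1) c.2))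
      = bNonident ((g2.length : Int) - 1) (bAgg cons g2) := by
  rw [aCountGroup_eq, items_mapV]
  unfold bNonident
  rw [List.map_map]
  apply List.map_congr_left
  intro c hc
  refine Prod.ext rfl ?_
  show niList ((g2.length : Int) - 1) (mapV cnt c.2) = _
  apply ni_eq
  intro q hq
  have hkn := (bAgg_inv cons g2).1
  have hpnd := (bAgg_inv cons g2).2 c hc
  have hc' : (c.1, c.2) ∈ (bAgg cons g2).items := by simpa using hc
  have hq' : (q.1, q.2) ∈ c.2.items := by simpa using hq
  have hgd1 : (bAgg cons g2).getD c.1 PySem.Dict.empty = c.2 :=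
    PySem.Dict.getD_of_mem_items _ hc' hkn _
  have hgd2 : c.2.getD q.1 [] = q.2 :=
    PySem.Dict.getD_of_mem_items _ hq' hpnd _
  refine ⟨bAgg_ne cons g2 c hc q hq, ?_⟩
  have hlen := bAgg_len cons g2 hnods c.1 q.1
  rw [hgd1, hgd2] at hlen
  have : (q.2.length : Int) ≤ (g2.length : Int) := by exact_mod_cast hlen
  omega

theorem main_eq (input : List (String × List (String × List (String × List (String × List (Int × String)))))) (cons : List (String × String))
    (hpre : Pre_remove_identical_calls input cons) :
    remove_identical_calls input cons = remove_identical_calls_alt input cons := by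
  obtain ⟨hcnd, hind, hsp⟩ := hpre
  simp only [remove_identical_calls, remove_identical_calls_alt]
  have hsnp : input.foldl (fun d sp => d.insert sp.1 (sp.2.foldl (fun gd g => gd.insert g.1 (aCountGroup cons g.2)) PySem.Dict.empty)) PySem.Dict.empty
      = PySem.Dict.mk (input.map (fun sp => (sp.1, sp.2.foldl (fun gd g => gd.insert g.1 (aCountGroup cons g.2)) PySem.Dict.empty))) :=
    fresh_fold_mk input Prod.fst _ hind
  have hsg : input.foldl (fun d sp => d.insert sp.1 (sp.2.foldl (fun gd g => gd.insert g.1 (((PySem.Dict.mk g.2).size : Int) - 1)) PySem.Dict.empty)) PySem.Dict.empty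
      = PySem.Dict.mk (input.map (fun sp => (sp.1, sp.2.foldl (fun gd g => gd.insert g.1 (((PySem.Dict.mk g.2).size : Int) - 1)) PySem.Dict.empty))) :=
    fresh_fold_mk input Prod.fst _ hind
  rw [hsnp, hsg, items_mk]
  rw [speciesfold input _ _ (by simpa [List.map_map, Function.comp] using hind)]
  simp only [List.map_map]
  rw [Prod.mk.injEq]
  constructor
  -- first component: the non-identical SNP sequences
  · apply List.map_congr_left
    intro sp hspm
    obtain ⟨hgn, hgrest⟩ := hsp sp hspm
    simp only [Function.comp]
    refine Prod.ext rfl ?_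
    simp only [aSpInner]
    have hagg : sp.2.foldl (fun gd g => gd.insert g.1 (aCountGroup cons g.2)) PySem.Dict.empty
        = PySem.Dict.mk (sp.2.map (fun g => (g.1, aCountGroup cons g.2))) :=
      fresh_fold_mk sp.2 Prod.fst _ hgn
    rw [hagg, items_mk]
    rw [groupfold input _ sp.1 _ (by simpa [List.map_map, Function.comp] using hgn)]
    simp only [List.map_map]
    apply List.map_congr_left
    intro g hgm
    obtain ⟨hsn, hcs, _⟩ := hgrest g hgm
    simp only [Function.comp, aGroupR]
    have hnum : (((PySem.Dict.mk (input.map (fun sp => (sp.1, sp.2.foldl (fun gd g => gd.insert g.1 (((PySem.Dict.mk g.2).size : Int) - 1)) PySem.Dict.empty)))).getD sp.1 PySem.Dict.empty).getD g.1 0)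
        = ((g.2.length : Int) - 1) := by
      have hm1 : (sp.1, sp.2.foldl (fun gd g => gd.insert g.1 (((PySem.Dict.mk g.2).size : Int) - 1)) PySem.Dict.empty)
          ∈ input.map (fun sp => (sp.1, sp.2.foldl (fun gd g => gd.insert g.1 (((PySem.Dict.mk g.2).size : Int) - 1)) PySem.Dict.empty)) :=
        List.mem_map_of_mem hspm
      have hnd1 : ((input.map (fun sp => (sp.1, sp.2.foldl (fun gd g => gd.insert g.1 (((PySem.Dict.mk g.2).size : Int) - 1)) PySem.Dict.empty))).map Prod.fst).Nodup := by
        simpa [List.map_map, Function.comp] using hind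
      rw [mkGetD PySem.Dict.empty hnd1 hm1]
      have hinner : sp.2.foldl (fun gd g => gd.insert g.1 (((PySem.Dict.mk g.2).size : Int) - 1)) PySem.Dict.empty
          = PySem.Dict.mk (sp.2.map (fun g => (g.1, ((PySem.Dict.mk g.2).size : Int) - 1))) :=
        fresh_fold_mk sp.2 Prod.fst _ hgn
      have hm2 : (g.1, ((PySem.Dict.mk g.2).size : Int) - 1) ∈ sp.2.map (fun g => (g.1, ((PySem.Dict.mk g.2).size : Int) - 1)) :=
        List.mem_map_of_mem hgm
      have hnd2 : ((sp.2.map (fun g => (g.1, ((PySem.Dict.mk g.2).size : Int) - 1))).map Prod.fst).Nodup := by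
        simpa [List.map_map, Function.comp] using hgn
      rw [hinner, mkGetD 0 hnd2 hm2]
      rfl
    rw [hnum, group_r input cons sp g hspm hgm hind hgn hsn ((g.2.length : Int) - 1)]
    refine Prod.ext rfl ?_
    show ((g.2.map Prod.fst).map (fun n => (n, sVal input sp.1 g.1 n ((g.2.length : Int) - 1) (aCountGroup cons g.2).items))).map
        (fun r => (r.1, r.2.items.map (fun c => (c.1, c.2.items)))) = bSeqGroup cons g.2
    rw [List.map_map, List.map_map]
    simp only [bSeqGroup]
    apply List.map_congr_left
    intro st hst
    refine Prod.ext rfl ?_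
    show (sVal input sp.1 g.1 st.1 ((g.2.length : Int) - 1) (aCountGroup cons g.2).items).items.map (fun c => (c.1, c.2.items)) = _
    simp only [sVal, items_mk, List.map_map]
    have hshape : (aCountGroup cons g.2).items.map
          ((fun c => (c.1, c.2.items)) ∘ (fun c => (c.1, PySem.Dict.mk ((niList ((g.2.length : Int) - 1) c.2).map (fun pos => (pos, aSeq input sp.1 g.1 st.1 c.1 pos))))))
        = ((aCountGroup cons g.2).items.map (fun c => (c.1, niList ((g.2.length : Int) - 1) c.2))).map
            (fun c => (c.1, c.2.map (fun pos => (pos, aSeq input sp.1 g.1 st.1 c.1 pos)))) := by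
      rw [List.map_map]
      rfl
    rw [hshape, acg_ni cons g.2 hcs]
    apply List.map_congr_left
    intro c _
    refine Prod.ext rfl ?_
    apply List.map_congr_left
    intro pos _
    rw [aSeq_resolve input sp g st hspm hgm hst hind hgn hsn c.1 pos]
  -- second component: the non-identical positions
  · apply List.map_congr_left
    intro sp hspm
    obtain ⟨hgn, hgrest⟩ := hsp sp hspm
    simp only [Function.comp]
    refine Prod.ext rfl ?_
    simp only [aSpInner]
    have hagg : sp.2.foldl (fun gd g => gd.insert g.1 (aCountGroup cons g.2)) PySem.Dict.empty
        = PySem.Dict.mk (sp.2.map (fun g => (g.1, aCountGroup cons g.2))) :=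
      fresh_fold_mk sp.2 Prod.fst _ hgn
    rw [hagg, items_mk]
    rw [groupfold input _ sp.1 _ (by simpa [List.map_map, Function.comp] using hgn)]
    simp only [List.map_map]
    apply List.map_congr_left
    intro g hgm
    obtain ⟨hsn, hcs, _⟩ := hgrest g hgm
    simp only [Function.comp, aGroupR]
    have hnum : (((PySem.Dict.mk (input.map (fun sp => (sp.1, sp.2.foldl (fun gd g => gd.insert g.1 (((PySem.Dict.mk g.2).size : Int) - 1)) PySem.Dict.empty)))).getD sp.1 PySem.Dict.empty).getD g.1 0)
        = ((g.2.length : Int) - 1) := by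
      have hm1 : (sp.1, sp.2.foldl (fun gd g => gd.insert g.1 (((PySem.Dict.mk g.2).size : Int) - 1)) PySem.Dict.empty)
          ∈ input.map (fun sp => (sp.1, sp.2.foldl (fun gd g => gd.insert g.1 (((PySem.Dict.mk g.2).size : Int) - 1)) PySem.Dict.empty)) :=
        List.mem_map_of_mem hspm
      have hnd1 : ((input.map (fun sp => (sp.1, sp.2.foldl (fun gd g => gd.insert g.1 (((PySem.Dict.mk g.2).size : Int) - 1)) PySem.Dict.empty))).map Prod.fst).Nodup := by
        simpa [List.map_map, Function.comp] using hind
      rw [mkGetD PySem.Dict.empty hnd1 hm1]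
      have hinner : sp.2.foldl (fun gd g => gd.insert g.1 (((PySem.Dict.mk g.2).size : Int) - 1)) PySem.Dict.empty
          = PySem.Dict.mk (sp.2.map (fun g => (g.1, ((PySem.Dict.mk g.2).size : Int) - 1))) :=
        fresh_fold_mk sp.2 Prod.fst _ hgn
      have hm2 : (g.1, ((PySem.Dict.mk g.2).size : Int) - 1) ∈ sp.2.map (fun g => (g.1, ((PySem.Dict.mk g.2).size : Int) - 1)) :=
        List.mem_map_of_mem hgm
      have hnd2 : ((sp.2.map (fun g => (g.1, ((PySem.Dict.mk g.2).size : Int) - 1))).map Prod.fst).Nodup := by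
        simpa [List.map_map, Function.comp] using hgn
      rw [hinner, mkGetD 0 hnd2 hm2]
      rfl
    rw [hnum, group_r input cons sp g hspm hgm hind hgn hsn ((g.2.length : Int) - 1)]
    refine Prod.ext rfl ?_
    by_cases hemp : g.2 = []
    · rw [hemp]
      rfl
    · have hne : (g.2.map Prod.fst).isEmpty = false := by
        cases hg2 : g.2 with
        | nil => exact absurd hg2 hemp
        | cons a l => rfl
      rw [hne]
      simp only [Bool.false_eq_true, if_false, pFinal, items_mk]
      show (aCountGroup cons g.2).items.map (fun c => (c.1, niList ((g.2.length : Int) - 1) c.2)) = bPosGroup cons g.2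
    -- identify A's list with B's, then strip the redundant set() on an already-unique list
      rw [acg_ni cons g.2 hcs]
      simp only [bPosGroup]
      conv_lhs => rw [← List.map_id (bNonident ((g.2.length : Int) - 1) (bAgg cons g.2))]
      apply List.map_congr_left
      intro c hc
      simp only [bNonident] at hc
      obtain ⟨q, hq, rfl⟩ := List.mem_map.mp hc
      have hnd : (q.2.keys).Nodup := (bAgg_inv cons g.2).2 q hq
      have : (PySem.Set.ofList (q.2.items.filterMap (fun p => if bKeep ((g.2.length : Int) - 1) p.2 then some p.1 else none)))
          = q.2.items.filterMap (fun p => if bKeep ((g.2.length : Int) - 1) p.2 then some p.1 else none) :=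
        PySem.Set.ofList_eq_self_of_nodup _ (List.Nodup.sublist (cond_filterMap_sublist _ q.2.items) hnd)
      simp only [id, this]

-- ===== VERDICT (by name: the statement is the Claim_ definition above) =====
theorem remove_identical_calls_spec : Claim_equal_remove_identical_calls := by
  intro input cons _ hpre
  exact main_eq input cons hpre
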